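-- pv_equiv track=rewrite | github.com/DvaCode/Algorithm_for_python | stack_solution.py | solution13_2
-- ===== SOURCE A (Python) =====
-- def solution13_2(board, moves):
--     answer = 0
--     stack_ = []
--     size_ = len(board)
--     board_ = []
--     for idx_x in range(size_):
--         lst = []
--         for idx_y in range(size_ - 1, -1, -1):
--             if board[idx_y][idx_x]:
--                 lst.append(board[idx_y][idx_x])
--         board_.append(lst)
--     for idx in moves:
--         if board_[idx-1]:
--             item = board_[idx - 1].pop()
--             if stack_ and item == stack_[-1]:
--                 stack_.pop()
--                 answer += 2
--             else:
--                 stack_.append(item)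
--     return answer
-- ===== SOURCE B (Python) =====
-- def solution13_2(board, moves):
--     n = len(board)
--     top = [0] * n          # per-column pointer into the original board (no precomputed stacks)
--     stack = []
--     answer = 0
--     for idx in moves:
--         c = idx - 1
--         r = top[c]
--         while r < n and board[r][c] == 0:
--             r += 1
--         if r < n:
--             doll = board[r][c]
--             top[c] = r + 1
--             if stack and doll == stack[-1]:
--                 stack.pop()
--                 answer += 2
--             else:
--                 stack.append(doll)
--     return answer
-- ===== Notes on version B (the rewrite author's own statement) =====
-- stated objective: faster
-- what changed: Replaces A's precomputed per-column doll stacks (built by a full n*n bottom-up pass over the board) with a per-column pointer array top[c] into the untouched board: each move lazily scans its column from top[c] down for the first non-zero cell, so untouched columns are never traversed.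
-- outside the precondition, e.g. on solution13_2([[0, 1, 2], [0, 1, 3]], [0, 0]): A returns 2, B returns 0
import Mathlib
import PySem

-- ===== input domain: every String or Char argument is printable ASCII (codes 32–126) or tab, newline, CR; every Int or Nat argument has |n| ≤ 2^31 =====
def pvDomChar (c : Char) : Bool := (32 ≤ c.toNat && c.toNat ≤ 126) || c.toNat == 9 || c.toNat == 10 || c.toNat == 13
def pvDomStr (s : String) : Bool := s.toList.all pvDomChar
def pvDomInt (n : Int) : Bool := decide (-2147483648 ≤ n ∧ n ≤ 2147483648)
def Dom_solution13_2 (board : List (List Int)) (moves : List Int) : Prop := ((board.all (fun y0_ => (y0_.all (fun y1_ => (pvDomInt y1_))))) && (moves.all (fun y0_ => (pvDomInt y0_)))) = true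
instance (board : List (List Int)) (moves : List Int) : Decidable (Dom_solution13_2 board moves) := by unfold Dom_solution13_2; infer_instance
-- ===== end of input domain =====

-- B replaces A's precomputed per-column stacks by per-column pointers into the untouched
-- board, scanning each moved column lazily for its next doll (neither version mutates its
-- arguments; the claim is about the return value).

-- ===== PORT A =====
-- board[idx_y][idx_x] : in-range under Pre_, so pyGetD with defaults is exact there
def pvCell (board : List (List Int)) (y x : Int) : Int :=
  PySem.List.pyGetD (PySem.List.pyGetD board y []) x 0

-- inner loop: for idx_y in range(size_-1, -1, -1): if board[idx_y][idx_x]: lst.append(...)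
def pvColA (board : List (List Int)) (size x : Int) : List Int :=
  (PySem.List.pyRange (size - 1) (-1) (-1)).foldl
    (fun lst y => if pvCell board y x ≠ 0 then lst ++ [pvCell board y x] else lst) []

-- one iteration of 'for idx in moves' (state: answer, stack_, board_)
def pvMoveA (st : Int × List Int × List (List Int)) (idx : Int) :
    Int × List Int × List (List Int) :=
  let answer := st.1
  let stack := st.2.1
  let bd := st.2.2
  match PySem.List.pyGet? bd (idx - 1) with
  | none => st                    -- IndexError in Python; excluded by Pre_
  | some col =>
    if col ≠ [] then
      let item := (PySem.List.pyGet? col (-1)).getD 0          -- .pop()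
      let bd' := PySem.List.pySetD bd (idx - 1) col.dropLast
      if stack ≠ [] ∧ item = (PySem.List.pyGet? stack (-1)).getD 0 then
        (answer + 2, stack.dropLast, bd')
      else
        (answer, stack ++ [item], bd')
    else st

def solution13_2 (board : List (List Int)) (moves : List Int) : Int :=
  let size : Int := board.length
  let board_ := (PySem.List.pyRange 0 size 1).map (fun x => pvColA board size x)
  (moves.foldl pvMoveA (0, [], board_)).1

-- ===== PORT B =====
-- while r < n and board[r][c] == 0: r += 1   (fuel ≥ n bounds the loop)
def pvScanB (board : List (List Int)) (n c : Int) : Int → Nat → Int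
  | r, 0 => r
  | r, fuel + 1 =>
      if r < n ∧ pvCell board r c = 0 then pvScanB board n c (r + 1) fuel else r

-- one iteration of 'for idx in moves' (state: answer, stack, top)
def pvMoveB (board : List (List Int)) (n : Nat) (st : Int × List Int × List Int)
    (idx : Int) : Int × List Int × List Int :=
  let answer := st.1
  let stack := st.2.1
  let top := st.2.2
  let c := idx - 1
  let r := pvScanB board n c ((PySem.List.pyGet? top c).getD 0) n
  if r < (n : Int) then
    let doll := pvCell board r c
    let top' := PySem.List.pySetD top c (r + 1)
    if stack ≠ [] ∧ doll = (PySem.List.pyGet? stack (-1)).getD 0 then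
      (answer + 2, stack.dropLast, top')
    else
      (answer, stack ++ [doll], top')
  else st

def solution13_2_alt (board : List (List Int)) (moves : List Int) : Int :=
  let n := board.length
  (moves.foldl (pvMoveB board n) (0, [], List.replicate n 0)).1

-- ===== PRECONDITION & SPEC =====
-- Pre_ excludes ragged boards with a row shorter than the board height (Python A raises
-- IndexError building board_), move indices m with m-1 outside [-len(board), len(board))
-- (A raises IndexError), and non-positive move indices on boards whose rows are LONGER than
-- the board height (there A's and B's negative-index wraparounds pick different columns —
-- a malformed 1-based move on a board wider than the problem's square N x N shape).
def Pre_solution13_2 (board : List (List Int)) (moves : List Int) : Prop :=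
  (∀ row ∈ board, board.length ≤ row.length) ∧
  (∀ m ∈ moves, 1 - (board.length : Int) ≤ m ∧ m ≤ (board.length : Int)) ∧
  ((∃ m ∈ moves, m ≤ 0) → ∀ row ∈ board, row.length = board.length)

instance (board : List (List Int)) (moves : List Int) : Decidable (Pre_solution13_2 board moves) := by
  unfold Pre_solution13_2; infer_instance

def pvWitness_solution13_2 : List (List Int) × List Int :=
  ([[0, 3], [2, 3]], [1, 2, 2])

def Spec_solution13_2 (board : List (List Int)) (moves : List Int) (out : Int) : Prop := out = solution13_2_alt board moves
instance (board : List (List Int)) (moves : List Int) (out : Int) : Decidable (Spec_solution13_2 board moves out) := by unfold Spec_solution13_2; infer_instance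

-- ===== CLAIM (what is proved, stated in full; the proofs are below) =====
def Claim_equal_solution13_2 : Prop := ∀ (board : List (List Int)) (moves : List Int), Dom_solution13_2 board moves → Pre_solution13_2 board moves → Spec_solution13_2 board moves (solution13_2 board moves)

-- ===== LEMMAS AND PROOFS =====

-- the column suffix A still holds for column c once B's pointer is at row t
def pvRest (board : List (List Int)) (c t : Nat) : List Int :=
  ((((List.range board.length).drop t).map (fun y : Nat => pvCell board (y : Int) (c : Int))).filter (· ≠ 0)).reverse

-- the simulation relation between A's board_ and B's top
def pvInv (board : List (List Int)) (bd : List (List Int)) (top : List Int) : Prop :=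
  bd.length = board.length ∧ top.length = board.length ∧
  ∀ c : Nat, c < board.length →
    ∃ t : Nat, t ≤ board.length ∧ top.getD c 0 = (t : Int) ∧
      bd.getD c [] = pvRest board c t

theorem pvRest_nil (board : List (List Int)) (c : Nat) :
    pvRest board c board.length = [] := by
  have h : (List.range board.length).drop board.length = [] :=
    List.drop_eq_nil_of_le (by simp)
  simp [pvRest, h]

theorem pvRange_drop_cons (n t : Nat) (h : t < n) :
    (List.range n).drop t = t :: (List.range n).drop (t + 1) := by
  rw [List.drop_eq_getElem_cons (by simpa using h), List.getElem_range]

theorem pvRest_zero_head (board : List (List Int)) (c t : Nat) (h : t < board.length)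
    (hz : pvCell board t c = 0) : pvRest board c t = pvRest board c (t + 1) := by
  unfold pvRest
  rw [pvRange_drop_cons _ _ h]
  simp [hz]

theorem pvRest_head (board : List (List Int)) (c t : Nat) (h : t < board.length)
    (hz : pvCell board t c ≠ 0) :
    pvRest board c t = pvRest board c (t + 1) ++ [pvCell board t c] := by
  unfold pvRest
  rw [pvRange_drop_cons _ _ h]
  simp [hz]

theorem pvScanB_spec (board : List (List Int)) (c t : Nat) (fuel : Nat)
    (ht : t ≤ board.length) (hf : board.length - t ≤ fuel) :
    (pvRest board c t = [] ∧
      pvScanB board board.length c t fuel = (board.length : Int)) ∨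
    (∃ r : Nat, t ≤ r ∧ r < board.length ∧
      pvScanB board board.length c t fuel = (r : Int) ∧
      pvCell board r c ≠ 0 ∧
      pvRest board c t = pvRest board c (r + 1) ++ [pvCell board r c]) := by
  induction fuel generalizing t with
  | zero =>
    have ht' : t = board.length := by omega
    subst ht'
    exact Or.inl ⟨pvRest_nil board c, by simp [pvScanB]⟩
  | succ fuel ih =>
    by_cases htn : t = board.length
    · subst htn
      refine Or.inl ⟨pvRest_nil board c, ?_⟩
      simp [pvScanB]
    · have htlt : t < board.length := by omega
      by_cases hz : pvCell board (t : Int) (c : Int) = 0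
      · have hstep : pvScanB board (board.length : Int) (c : Int) (t : Int) (fuel + 1) =
            pvScanB board (board.length : Int) (c : Int) ((t + 1 : Nat) : Int) fuel := by
          have hcond : ((t : Int) < (board.length : Int) ∧ pvCell board (t : Int) (c : Int) = 0) :=
            ⟨by exact_mod_cast htlt, hz⟩
          rw [pvScanB, if_pos hcond]
          norm_cast
        have hrest := pvRest_zero_head board c t htlt hz
        rcases ih (t + 1) (by omega) (by omega) with ⟨h1, h2⟩ | ⟨r, hr1, hr2, hr3, hr4, hr5⟩
        · exact Or.inl ⟨hrest.trans h1, hstep.trans h2⟩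
        · exact Or.inr ⟨r, by omega, hr2, hstep.trans hr3, hr4, hrest.trans hr5⟩
      · refine Or.inr ⟨t, le_refl t, htlt, ?_, hz, pvRest_head board c t htlt hz⟩
        rw [pvScanB]
        simp [hz]

theorem pvMove_eq_pos (board : List (List Int)) (idx a : Int) (s : List Int)
    (bd : List (List Int)) (top : List Int)
    (hinv : pvInv board bd top) (h1 : 1 ≤ idx) (h2 : idx ≤ (board.length : Int)) :
    (pvMoveA (a, s, bd) idx).1 = (pvMoveB board board.length (a, s, top) idx).1 ∧
    (pvMoveA (a, s, bd) idx).2.1 = (pvMoveB board board.length (a, s, top) idx).2.1 ∧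
    pvInv board (pvMoveA (a, s, bd) idx).2.2 (pvMoveB board board.length (a, s, top) idx).2.2 := by
  obtain ⟨hbd, htop, hc⟩ := hinv
  have hci : idx - 1 = ((idx - 1).toNat : Int) := by omega
  set c : Nat := (idx - 1).toNat with hcdef
  have hcn : c < board.length := by omega
  obtain ⟨t, htn, htopc, hbdc⟩ := hc c hcn
  have hgA : PySem.List.pyGet? bd (idx - 1) = some (pvRest board c t) := by
    rw [hci, PySem.List.pyGet?_natCast,
      List.getElem?_eq_getElem (show c < bd.length by omega)]
    rw [← hbdc, List.getD_eq_getElem?_getD,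
      List.getElem?_eq_getElem (show c < bd.length by omega)]
    rfl
  have hgB : (PySem.List.pyGet? top ((c : Nat) : Int)).getD 0 = (t : Int) := by
    rw [PySem.List.pyGet?_natCast, ← List.getD_eq_getElem?_getD]
    exact htopc
  rcases pvScanB_spec board c t board.length htn (by omega) with
    ⟨hre, hsc⟩ | ⟨r, hr1, hr2, hsc, hnz, hre⟩
  · have eA : pvMoveA (a, s, bd) idx = (a, s, bd) := by
      simp only [pvMoveA, hgA, hre]
      simp
    have eB : pvMoveB board board.length (a, s, top) idx = (a, s, top) := by
      simp only [pvMoveB]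
      rw [hci, hgB, hsc]
      simp
    rw [eA, eB]
    exact ⟨rfl, rfl, hbd, htop, hc⟩
  · have eA : pvMoveA (a, s, bd) idx =
        (if s ≠ [] ∧ pvCell board (r : Int) (c : Int) = (PySem.List.pyGet? s (-1)).getD 0
          then (a + 2, s.dropLast, bd.set c (pvRest board c (r + 1)))
          else (a, s ++ [pvCell board (r : Int) (c : Int)], bd.set c (pvRest board c (r + 1)))) := by
      simp only [pvMoveA, hgA, hre]
      rw [hci]
      rw [PySem.List.pyGet?_neg_one_append_singleton, List.dropLast_concat]
      have hset : PySem.List.pySetD bd ((c : Nat) : Int) (pvRest board c (r + 1)) =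
          bd.set c (pvRest board c (r + 1)) := by
        unfold PySem.List.pySetD
        rw [PySem.List.pySet?_natCast _ _ _ (show c < bd.length by omega)]
        rfl
      simp [hset]
    have eB : pvMoveB board board.length (a, s, top) idx =
        (if s ≠ [] ∧ pvCell board (r : Int) (c : Int) = (PySem.List.pyGet? s (-1)).getD 0
          then (a + 2, s.dropLast, top.set c ((r : Int) + 1))
          else (a, s ++ [pvCell board (r : Int) (c : Int)], top.set c ((r : Int) + 1))) := by
      simp only [pvMoveB]
      rw [hci, hgB, hsc]
      have hset : PySem.List.pySetD top ((c : Nat) : Int) ((r : Int) + 1) =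
          top.set c ((r : Int) + 1) := by
        unfold PySem.List.pySetD
        rw [PySem.List.pySet?_natCast _ _ _ (show c < top.length by omega)]
        rfl
      rw [if_pos (show ((r : Int) < (board.length : Int)) by exact_mod_cast hr2)]
      simp [hset]
    have hinv' : pvInv board (bd.set c (pvRest board c (r + 1))) (top.set c ((r : Int) + 1)) := by
      refine ⟨by simp [hbd], by simp [htop], ?_⟩
      intro c' hc'
      by_cases hcc : c = c'
      · subst hcc
        refine ⟨r + 1, by omega, ?_, ?_⟩
        · rw [List.getD_eq_getElem?_getD, List.getElem?_set_self (by omega)]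
          push_cast; rfl
        · rw [List.getD_eq_getElem?_getD, List.getElem?_set_self (by omega)]
          rfl
      · obtain ⟨t', ht1', ht2', ht3'⟩ := hc c' hc'
        refine ⟨t', ht1', ?_, ?_⟩
        · rw [List.getD_eq_getElem?_getD, List.getElem?_set_ne hcc, ← List.getD_eq_getElem?_getD]
          exact ht2'
        · rw [List.getD_eq_getElem?_getD, List.getElem?_set_ne hcc, ← List.getD_eq_getElem?_getD]
          exact ht3'
    rw [eA, eB]
    by_cases hcond : s ≠ [] ∧ pvCell board (r : Int) (c : Int) = (PySem.List.pyGet? s (-1)).getD 0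
    · rw [if_pos hcond, if_pos hcond]
      exact ⟨rfl, rfl, hinv'⟩
    · rw [if_neg hcond, if_neg hcond]
      exact ⟨rfl, rfl, hinv'⟩

theorem pvIdx_resolve_neg (n : Nat) (i : Int) (c : Nat) (h1 : i < 0)
    (h2 : i + n = (c : Int)) (_hc : c < n) : PySem.List.pyIdx? n i = some c := by
  unfold PySem.List.pyIdx?
  rw [if_neg (by omega), if_pos (by omega)]
  congr 1
  omega

theorem pvIdx_resolve_pos (n : Nat) (c : Nat) (hc : c < n) :
    PySem.List.pyIdx? n ((c : Int) + 1 - 1) = some c := by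
  unfold PySem.List.pyIdx?
  rw [if_pos (by omega), if_pos (by exact_mod_cast (by omega : (c : Int) + 1 - 1 < n))]
  congr 1
  omega

theorem pvMoveA_norm (a : Int) (s : List Int) (bd : List (List Int)) (idx : Int) (c : Nat)
    (hneg : idx - 1 < 0) (hk : idx - 1 + (bd.length : Int) = (c : Int)) (hc : c < bd.length) :
    pvMoveA (a, s, bd) idx = pvMoveA (a, s, bd) ((c : Int) + 1) := by
  have hidx1 : PySem.List.pyIdx? bd.length (idx - 1) = some c :=
    pvIdx_resolve_neg _ _ _ hneg hk hc
  have hidx2 : PySem.List.pyIdx? bd.length ((c : Int) + 1 - 1) = some c :=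
    pvIdx_resolve_pos _ _ hc
  have hg : PySem.List.pyGet? bd (idx - 1) = PySem.List.pyGet? bd ((c : Int) + 1 - 1) := by
    unfold PySem.List.pyGet?
    rw [hidx1, hidx2]
  have hset : ∀ v, PySem.List.pySetD bd (idx - 1) v = PySem.List.pySetD bd ((c : Int) + 1 - 1) v := by
    intro v
    unfold PySem.List.pySetD PySem.List.pySet?
    rw [hidx1, hidx2]
  simp only [pvMoveA, hg, hset]

theorem pvCell_norm (board : List (List Int)) (idx : Int) (c : Nat)
    (hsq : ∀ row ∈ board, row.length = board.length)
    (hneg : idx - 1 < 0) (hk : idx - 1 + (board.length : Int) = (c : Int))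
    (hc : c < board.length) (r : Int) (hr0 : 0 ≤ r) (hrn : r < (board.length : Int)) :
    pvCell board r (idx - 1) = pvCell board r ((c : Int) + 1 - 1) := by
  have hrow : PySem.List.pyGetD board r [] ∈ board := by
    apply PySem.List.pyGetD_mem
    constructor <;> omega
  have hlen : (PySem.List.pyGetD board r []).length = board.length := hsq _ hrow
  have key : ∀ row : List Int, row.length = board.length →
      PySem.List.pyGetD row (idx - 1) 0 = PySem.List.pyGetD row ((c : Int) + 1 - 1) 0 := by
    intro row hl
    unfold PySem.List.pyGetD PySem.List.pyGet?
    rw [hl, pvIdx_resolve_neg _ _ _ hneg hk hc, pvIdx_resolve_pos _ _ hc]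
  unfold pvCell
  exact key _ hlen

theorem pvScanB_ge (board : List (List Int)) (n c : Int) (r : Int) (fuel : Nat) :
    r ≤ pvScanB board n c r fuel := by
  induction fuel generalizing r with
  | zero => simp [pvScanB]
  | succ fuel ih =>
    rw [pvScanB]
    split
    · exact le_trans (by omega) (ih (r + 1))
    · exact le_refl r

theorem pvScanB_congr (board : List (List Int)) (n c1 c2 : Int)
    (h : ∀ r : Int, 0 ≤ r → r < n → pvCell board r c1 = pvCell board r c2)
    (r : Int) (hr : 0 ≤ r) (fuel : Nat) :
    pvScanB board n c1 r fuel = pvScanB board n c2 r fuel := by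
  induction fuel generalizing r with
  | zero => rfl
  | succ fuel ih =>
    rw [pvScanB, pvScanB]
    by_cases hrn : r < n
    · rw [h r hr hrn]
      split
      · exact ih (r + 1) (by omega)
      · rfl
    · rw [if_neg (by tauto), if_neg (by tauto)]

theorem pvMoveB_norm (board : List (List Int)) (a : Int) (s : List Int) (top : List Int)
    (idx : Int) (c : Nat) (htop : top.length = board.length)
    (hsq : ∀ row ∈ board, row.length = board.length)
    (hstart : 0 ≤ (PySem.List.pyGet? top ((c : Int) + 1 - 1)).getD 0)
    (hneg : idx - 1 < 0) (hk : idx - 1 + (board.length : Int) = (c : Int))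
    (hc : c < board.length) :
    pvMoveB board board.length (a, s, top) idx =
      pvMoveB board board.length (a, s, top) ((c : Int) + 1) := by
  have hidx1 : PySem.List.pyIdx? top.length (idx - 1) = some c :=
    pvIdx_resolve_neg _ _ _ hneg (by rw [htop]; exact hk) (by omega)
  have hidx2 : PySem.List.pyIdx? top.length ((c : Int) + 1 - 1) = some c :=
    pvIdx_resolve_pos _ _ (by omega)
  have hgt : PySem.List.pyGet? top (idx - 1) = PySem.List.pyGet? top ((c : Int) + 1 - 1) := by
    unfold PySem.List.pyGet?
    rw [hidx1, hidx2]
  have hsett : ∀ v, PySem.List.pySetD top (idx - 1) v = PySem.List.pySetD top ((c : Int) + 1 - 1) v := by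
    intro v
    unfold PySem.List.pySetD PySem.List.pySet?
    rw [hidx1, hidx2]
  have hcell : ∀ r : Int, 0 ≤ r → r < (board.length : Int) →
      pvCell board r (idx - 1) = pvCell board r ((c : Int) + 1 - 1) :=
    pvCell_norm board idx c hsq hneg hk hc
  have hscan : pvScanB board (board.length : Int) (idx - 1)
        ((PySem.List.pyGet? top ((c : Int) + 1 - 1)).getD 0) board.length =
      pvScanB board (board.length : Int) ((c : Int) + 1 - 1)
        ((PySem.List.pyGet? top ((c : Int) + 1 - 1)).getD 0) board.length :=
    pvScanB_congr board _ _ _ hcell _ hstart board.length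
  simp only [pvMoveB, hgt, hsett, hscan]
  by_cases hlt : pvScanB board (board.length : Int) ((c : Int) + 1 - 1)
      ((PySem.List.pyGet? top ((c : Int) + 1 - 1)).getD 0) board.length < (board.length : Int)
  · rw [if_pos hlt, if_pos hlt]
    rw [hcell _ (le_trans hstart (pvScanB_ge _ _ _ _ _)) hlt]
  · rw [if_neg hlt, if_neg hlt]

theorem pvMove_eq (board : List (List Int)) (idx a : Int) (s : List Int)
    (bd : List (List Int)) (top : List Int)
    (hinv : pvInv board bd top) (h1 : 1 - (board.length : Int) ≤ idx)
    (h2 : idx ≤ (board.length : Int))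
    (hsq : idx ≤ 0 → ∀ row ∈ board, row.length = board.length) :
    (pvMoveA (a, s, bd) idx).1 = (pvMoveB board board.length (a, s, top) idx).1 ∧
    (pvMoveA (a, s, bd) idx).2.1 = (pvMoveB board board.length (a, s, top) idx).2.1 ∧
    pvInv board (pvMoveA (a, s, bd) idx).2.2 (pvMoveB board board.length (a, s, top) idx).2.2 := by
  by_cases hpos : 1 ≤ idx
  · exact pvMove_eq_pos board idx a s bd top hinv hpos h2
  · have hneg : idx - 1 < 0 := by omega
    obtain ⟨hbd, htop, hc⟩ := hinv
    have hn0 : 0 < board.length := by omega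
    have hkn : 0 ≤ idx - 1 + (board.length : Int) := by omega
    set c : Nat := (idx - 1 + (board.length : Int)).toNat with hcdef
    have hk : idx - 1 + (board.length : Int) = (c : Int) := by omega
    have hcn : c < board.length := by omega
    obtain ⟨t, htn, htopc, hbdc⟩ := hc c hcn
    have hstart : 0 ≤ (PySem.List.pyGet? top ((c : Int) + 1 - 1)).getD 0 := by
      have he : ((c : Int) + 1 - 1) = (c : Int) := by ring
      rw [he, PySem.List.pyGet?_natCast, ← List.getD_eq_getElem?_getD, htopc]
      omega
    have eA := pvMoveA_norm a s bd idx c hneg (by rw [hbd]; exact hk) (by omega)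
    have eB := pvMoveB_norm board a s top idx c htop (hsq (by omega)) hstart hneg hk hcn
    rw [eA, eB]
    exact pvMove_eq_pos board ((c : Int) + 1) a s bd top ⟨hbd, htop, hc⟩ (by omega) (by omega)

theorem pvLoop_eq (board : List (List Int)) (moves : List Int) (a : Int) (s : List Int)
    (bd : List (List Int)) (top : List Int)
    (hinv : pvInv board bd top)
    (hm : ∀ m ∈ moves, (1 - (board.length : Int) ≤ m ∧ m ≤ (board.length : Int)) ∧
      (m ≤ 0 → ∀ row ∈ board, row.length = board.length)) :
    (moves.foldl pvMoveA (a, s, bd)).1 =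
      (moves.foldl (pvMoveB board board.length) (a, s, top)).1 := by
  induction moves generalizing a s bd top with
  | nil => rfl
  | cons m ms ih =>
    obtain ⟨⟨hm1, hm2⟩, hm3⟩ := hm m (List.mem_cons_self ..)
    obtain ⟨e1, e2, hinv'⟩ := pvMove_eq board m a s bd top hinv hm1 hm2 hm3
    simp only [List.foldl_cons]
    have hms : ∀ m' ∈ ms, (1 - (board.length : Int) ≤ m' ∧ m' ≤ (board.length : Int)) ∧
        (m' ≤ 0 → ∀ row ∈ board, row.length = board.length) :=
      fun m' hm' => hm m' (List.mem_cons_of_mem _ hm')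
    have h := ih ((pvMoveA (a, s, bd) m).1) ((pvMoveA (a, s, bd) m).2.1)
      ((pvMoveA (a, s, bd) m).2.2) ((pvMoveB board board.length (a, s, top) m).2.2)
      hinv' hms
    have hB : pvMoveB board board.length (a, s, top) m =
        ((pvMoveA (a, s, bd) m).1, (pvMoveA (a, s, bd) m).2.1,
          (pvMoveB board board.length (a, s, top) m).2.2) := by rw [e1, e2]
    rw [hB]
    exact h

theorem pvFoldCol (g : Int → Int) (l : List Int) (acc : List Int) :
    l.foldl (fun lst y => if g y ≠ 0 then lst ++ [g y] else lst) acc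
      = acc ++ (l.filter (fun y => g y ≠ 0)).map g := by
  induction l generalizing acc with
  | nil => simp
  | cons x xs ih =>
    simp only [List.foldl_cons, List.filter_cons]
    by_cases hx : g x ≠ 0
    · rw [if_pos hx, ih]
      simp [hx]
    · rw [if_neg hx, ih]
      simp [hx]

theorem pvRange_down (n : Nat) :
    PySem.List.pyRange ((n : Int) - 1) (-1) (-1) =
      (List.range n).map (fun k : Nat => (n : Int) - 1 - (k : Int)) := by
  rw [PySem.List.pyRange.eq_def]
  rw [if_neg (by decide : ¬ ((-1:Int) = 0)), if_neg (by decide : ¬ ((0:Int) < -1))]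
  by_cases h0 : (-1:Int) < (n:Int) - 1
  · rw [if_pos h0]
    have he : (((n : Int) - 1 - -1 + - -1 - 1) / - -1).toNat = n := by
      have h2 : ((n : Int) - 1 - -1 + - -1 - 1) / - -1 = (n : Int) := by norm_num
      rw [h2, Int.toNat_natCast]
    rw [he]
    exact List.map_congr_left (fun k _ => by ring)
  · rw [if_neg h0]
    have hn : n = 0 := by omega
    subst hn
    simp

theorem pvRangeMap_rev (n : Nat) :
    (List.range n).map (fun k : Nat => (n : Int) - 1 - (k : Int)) =
      ((List.range n).map (fun k : Nat => (k : Int))).reverse := by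
  apply List.ext_getElem
  · simp
  · intro i h1 h2
    simp only [List.length_map, List.length_range] at h1 h2
    simp only [List.getElem_map, List.getElem_range, List.getElem_reverse,
      List.length_map, List.length_range]
    omega

theorem pvColA_rest (board : List (List Int)) (c : Nat) :
    pvColA board (board.length : Int) (c : Int) = pvRest board c 0 := by
  unfold pvColA pvRest
  rw [pvRange_down, pvRangeMap_rev,
    pvFoldCol (fun y => pvCell board y (c : Int)), List.filter_reverse, List.map_reverse]
  simp [List.filter_map, List.map_map, Function.comp_def]

theorem pvInit_inv (board : List (List Int)) :
    pvInv board
      ((PySem.List.pyRange 0 (board.length : Int) 1).map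
        (fun x => pvColA board (board.length : Int) x))
      (List.replicate board.length 0) := by
  refine ⟨by simp [PySem.List.length_pyRange_one], by simp, ?_⟩
  intro c hcn
  refine ⟨0, by omega, by simp [List.getD_eq_getElem?_getD, hcn], ?_⟩
  rw [List.getD_eq_getElem?_getD, PySem.List.getElem?_map_pyRange_zero _ _ _ hcn]
  exact pvColA_rest board c

-- ===== VERDICT (by name: the statement is the Claim_ definition above) =====
theorem solution13_2_spec : Claim_equal_solution13_2 := by
  intro board moves _hdom hpre
  unfold Spec_solution13_2 solution13_2 solution13_2_alt
  refine pvLoop_eq board moves 0 [] _ _ (pvInit_inv board) ?_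
  intro m hm
  exact ⟨hpre.2.1 m hm, fun hm0 => hpre.2.2 ⟨m, hm, hm0⟩⟩
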